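-- pv_equiv track=rewrite | github.com/ianmiell/themortgagemeter | retrieval/mortgages/mc_util.py | validate_eligibility_dict
-- ===== SOURCE A (Python) =====
-- def validate_eligibility_dict(eligibility_dict,list_so_far):
-- 	#print eligibility_dict
-- 	#print list_so_far
-- 	for key in eligibility_dict.keys():
-- 		if eligibility_dict[key] == 'B':
-- 			a = eligibility_dict.copy()
-- 			b = eligibility_dict.copy()
-- 			a[key] = 'T'
-- 			b[key] = 'F'
-- 			return validate_eligibility_dict(a,list_so_far) + validate_eligibility_dict(b,list_so_far)
-- 	if eligibility_dict == {'existing_customer' : 'F', 'ftb' : 'T', 'moving_home' : 'F', 'borrowing_more' : 'F', 'remortgage' : 'F', 'switching' : 'F'}: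
-- 		return list_so_far + ['NFTB']
-- 	elif eligibility_dict == {'existing_customer' : 'F', 'ftb' : 'F', 'moving_home' : 'T', 'borrowing_more' : 'F', 'remortgage' : 'F', 'switching' : 'F'}:
-- 		return list_so_far + ['NMH']
-- 	elif eligibility_dict == {'existing_customer' : 'F', 'ftb' : 'F', 'moving_home' : 'F', 'borrowing_more' : 'F', 'remortgage' : 'T', 'switching' : 'F'}:
-- 		return list_so_far + ['NRM']
-- 	elif eligibility_dict == {'existing_customer' : 'T', 'ftb' : 'F', 'moving_home' : 'F', 'borrowing_more' : 'F', 'remortgage' : 'T', 'switching' : 'F'}: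
-- 		return list_so_far + ['EDE']
-- 	elif eligibility_dict == {'existing_customer' : 'T', 'ftb' : 'F', 'moving_home' : 'T', 'borrowing_more' : 'F', 'remortgage' : 'F', 'switching' : 'F'}:
-- 		return list_so_far + ['EMH']
-- 	elif eligibility_dict == {'existing_customer' : 'T', 'ftb' : 'F', 'moving_home' : 'F', 'borrowing_more' : 'T', 'remortgage' : 'F', 'switching' : 'F'}:
-- 		return list_so_far + ['EBM']
-- 	elif eligibility_dict == {'existing_customer' : 'T', 'ftb' : 'F', 'moving_home' : 'F', 'borrowing_more' : 'F', 'remortgage' : 'F', 'switching' : 'T'}: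
-- 		return list_so_far + ['EED']
-- 	else:
-- 		return list_so_far
-- ===== SOURCE B (Python) =====
-- # Different decomposition: expand the 'B' keys iteratively into all T/F combinations
-- # (T before F, first B key most significant), and replace the seven whole-dict equality
-- # tests by a single classifier: check the key set once, check all values are T/F, and
-- # look the set of 'T' keys up in a compact table of T-key-sets -> label.
--
-- _KEYS = ['existing_customer', 'ftb', 'moving_home', 'borrowing_more', 'remortgage', 'switching']
-- _TSETS = [
-- 	({'ftb'}, 'NFTB'),
-- 	({'moving_home'}, 'NMH'),
-- 	({'remortgage'}, 'NRM'),
-- 	({'existing_customer', 'remortgage'}, 'EDE'),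
-- 	({'existing_customer', 'moving_home'}, 'EMH'),
-- 	({'existing_customer', 'borrowing_more'}, 'EBM'),
-- 	({'existing_customer', 'switching'}, 'EED'),
-- ]
--
-- def _label(d):
-- 	if set(d.keys()) != set(_KEYS):
-- 		return None
-- 	if any(v != 'T' and v != 'F' for v in d.values()):
-- 		return None
-- 	tset = {k for k, v in d.items() if v == 'T'}
-- 	for s, lab in _TSETS:
-- 		if tset == s:
-- 			return lab
-- 	return None
--
-- def validate_eligibility_dict(eligibility_dict, list_so_far):
-- 	bkeys = [k for k, v in eligibility_dict.items() if v == 'B']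
-- 	combos = [[]]
-- 	for _ in bkeys:
-- 		combos = [['T'] + c for c in combos] + [['F'] + c for c in combos]
-- 	out = []
-- 	for c in combos:
-- 		d = dict(eligibility_dict)
-- 		for k, v in zip(bkeys, c):
-- 			d[k] = v
-- 		out += list_so_far
-- 		lab = _label(d)
-- 		if lab is not None:
-- 			out.append(lab)
-- 	return out
-- ===== Notes on version B (the rewrite author's own statement) =====
-- stated objective: alternative
-- what changed: Replaces the branching recursion (find first 'B' key, recurse twice on T/F copies, compare the leaf dict against 7 whole pattern dicts) by an iterative expansion of all T/F combinations in the same DFS order plus a single classifier that checks the key set once, checks all values are T/F, and looks the set of 'T' keys up in a compact table of T-key-sets to labels.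
import Mathlib
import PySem

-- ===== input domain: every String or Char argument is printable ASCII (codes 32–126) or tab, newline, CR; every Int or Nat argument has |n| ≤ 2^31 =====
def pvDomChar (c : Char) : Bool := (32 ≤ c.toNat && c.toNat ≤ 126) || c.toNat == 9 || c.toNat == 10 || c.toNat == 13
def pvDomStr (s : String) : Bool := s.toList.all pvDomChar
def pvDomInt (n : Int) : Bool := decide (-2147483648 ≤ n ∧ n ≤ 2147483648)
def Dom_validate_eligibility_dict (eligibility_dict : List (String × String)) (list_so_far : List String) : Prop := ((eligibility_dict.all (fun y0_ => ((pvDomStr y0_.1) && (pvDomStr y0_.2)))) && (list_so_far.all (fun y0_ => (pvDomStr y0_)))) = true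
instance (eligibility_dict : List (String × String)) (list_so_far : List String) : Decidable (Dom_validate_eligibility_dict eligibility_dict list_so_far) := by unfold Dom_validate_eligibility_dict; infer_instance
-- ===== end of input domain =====

-- B replaces A's branching recursion over 'B' keys (two dict copies per 'B' and 7 whole-dict
-- equality tests per leaf) by an iterative expansion of the T/F combinations plus a compact
-- classifier mapping the set of 'T' keys to the label; same result, alternative decomposition.


-- ===== PORT A =====
-- Python's `==` on dicts ignores insertion order: same size and every (key, value) of d
-- found in e. Exact for the dicts arising here, whose keys are distinct.
def pvDictEq (d e : PySem.Dict String String) : Bool :=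
  d.size == e.size && d.items.all (fun p => e.get? p.1 == some p.2)

def pvPatNFTB : PySem.Dict String String := PySem.Dict.ofList [("existing_customer","F"),("ftb","T"),("moving_home","F"),("borrowing_more","F"),("remortgage","F"),("switching","F")]
def pvPatNMH : PySem.Dict String String := PySem.Dict.ofList [("existing_customer","F"),("ftb","F"),("moving_home","T"),("borrowing_more","F"),("remortgage","F"),("switching","F")]
def pvPatNRM : PySem.Dict String String := PySem.Dict.ofList [("existing_customer","F"),("ftb","F"),("moving_home","F"),("borrowing_more","F"),("remortgage","T"),("switching","F")]
def pvPatEDE : PySem.Dict String String := PySem.Dict.ofList [("existing_customer","T"),("ftb","F"),("moving_home","F"),("borrowing_more","F"),("remortgage","T"),("switching","F")]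
def pvPatEMH : PySem.Dict String String := PySem.Dict.ofList [("existing_customer","T"),("ftb","F"),("moving_home","T"),("borrowing_more","F"),("remortgage","F"),("switching","F")]
def pvPatEBM : PySem.Dict String String := PySem.Dict.ofList [("existing_customer","T"),("ftb","F"),("moving_home","F"),("borrowing_more","T"),("remortgage","F"),("switching","F")]
def pvPatEED : PySem.Dict String String := PySem.Dict.ofList [("existing_customer","T"),("ftb","F"),("moving_home","F"),("borrowing_more","F"),("remortgage","F"),("switching","T")]

-- A's trailing if/elif chain of whole-dict comparisons.
def pvLeaf (d : PySem.Dict String String) (l : List String) : List String :=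
  if pvDictEq d pvPatNFTB then l ++ ["NFTB"]
  else if pvDictEq d pvPatNMH then l ++ ["NMH"]
  else if pvDictEq d pvPatNRM then l ++ ["NRM"]
  else if pvDictEq d pvPatEDE then l ++ ["EDE"]
  else if pvDictEq d pvPatEMH then l ++ ["EMH"]
  else if pvDictEq d pvPatEBM then l ++ ["EBM"]
  else if pvDictEq d pvPatEED then l ++ ["EED"]
  else l

-- A's loop `for key in d: if d[key] == 'B': …`: iterating a dict's keys and indexing
-- yields exactly its items in order, so this is the first item whose value is 'B'.
def pvFirstB (d : PySem.Dict String String) : Option (String × String) :=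
  d.items.find? (fun p => p.2 == "B")

-- A's recursion; the fuel only makes it structural (started at size+1 it can never run
-- out, since each step turns one 'B' value into 'T'/'F' and the key count is fixed).
def pvGoA : Nat → PySem.Dict String String → List String → List String
  | 0, _, l => l
  | fuel+1, d, l =>
    match pvFirstB d with
    | some p => pvGoA fuel (d.insert p.1 "T") l ++ pvGoA fuel (d.insert p.1 "F") l
    | none => pvLeaf d l

def validate_eligibility_dict (eligibility_dict : List (String × String)) (list_so_far : List String) : List String :=
  let d := PySem.Dict.ofList eligibility_dict
  pvGoA (d.size + 1) d list_so_far

-- ===== PORT B =====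
-- _KEYS and _TSETS of Source B (a Python set of string literals is its distinct-element list).
def pvKeys6 : List String := ["existing_customer", "ftb", "moving_home", "borrowing_more", "remortgage", "switching"]
def pvTSets : List (List String × String) :=
  [(["ftb"], "NFTB"), (["moving_home"], "NMH"), (["remortgage"], "NRM"),
   (["existing_customer", "remortgage"], "EDE"), (["existing_customer", "moving_home"], "EMH"),
   (["existing_customer", "borrowing_more"], "EBM"), (["existing_customer", "switching"], "EED")]

-- Source B's _label; Python's `==` on sets is mutual containment of the element lists.
def pvLabel (d : PySem.Dict String String) : Option String :=
  if !(d.keys.all (fun k => pvKeys6.contains k) && pvKeys6.all (fun k => d.keys.contains k)) then none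
  else if d.values.any (fun v => !(v == "T") && !(v == "F")) then none
  else
    let tset := (d.items.filter (fun q => q.2 == "T")).map Prod.fst
    (pvTSets.find? (fun p => tset.all (fun k => p.1.contains k) && p.1.all (fun k => tset.contains k))).map Prod.snd

def validate_eligibility_dict_alt (eligibility_dict : List (String × String)) (list_so_far : List String) : List String :=
  let d := PySem.Dict.ofList eligibility_dict
  let bkeys := (d.items.filter (fun p => p.2 == "B")).map Prod.fst
  let combos := bkeys.foldl (fun cs _ => cs.map (fun c => "T" :: c) ++ cs.map (fun c => "F" :: c)) [[]]
  combos.foldl (fun out c =>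
    let d2 := (bkeys.zip c).foldl (fun d p => d.insert p.1 p.2) d
    let out := out ++ list_so_far
    match pvLabel d2 with
    | some lab => out ++ [lab]
    | none => out) []

-- ===== PRECONDITION & SPEC =====
def Spec_validate_eligibility_dict (eligibility_dict : List (String × String)) (list_so_far : List String) (out : List String) : Prop := out = validate_eligibility_dict_alt eligibility_dict list_so_far
instance (eligibility_dict : List (String × String)) (list_so_far : List String) (out : List String) : Decidable (Spec_validate_eligibility_dict eligibility_dict list_so_far out) := by unfold Spec_validate_eligibility_dict; infer_instance

-- ===== CLAIM (what is proved, stated in full; the proofs are below) =====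
def Claim_equal_validate_eligibility_dict : Prop := ∀ (eligibility_dict : List (String × String)) (list_so_far : List String), Dom_validate_eligibility_dict eligibility_dict list_so_far → Spec_validate_eligibility_dict eligibility_dict list_so_far (validate_eligibility_dict eligibility_dict list_so_far)

-- ===== LEMMAS AND PROOFS =====

-- proof-level names for the pieces of B's pipeline
def pvBKeys (d : PySem.Dict String String) : List String :=
  (d.items.filter (fun p => p.2 == "B")).map Prod.fst

def pvStep (cs : List (List String)) : List (List String) :=
  cs.map (fun c => "T" :: c) ++ cs.map (fun c => "F" :: c)

def pvApply (d : PySem.Dict String String) (pairs : List (String × String)) : PySem.Dict String String :=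
  pairs.foldl (fun d p => d.insert p.1 p.2) d

-- all T/F combinations for n 'B' keys, in B's generation order
def pvIter : Nat → List (List String)
  | 0 => [[]]
  | n+1 => pvStep (pvIter n)

def pvRep : Nat → List (List String) → List (List String)
  | 0, i => i
  | n+1, i => pvRep n (pvStep i)

-- the T-key list of a dict
def pvTKeys (d : PySem.Dict String String) : List String :=
  (d.items.filter (fun q => q.2 == "T")).map Prod.fst

lemma pvFoldl_rep (l : List String) : ∀ (i : List (List String)),
    l.foldl (fun cs _ => pvStep cs) i = pvRep l.length i := by
  induction l with
  | nil => intro i; simp [pvRep]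
  | cons x xs ih => intro i; simp [List.foldl_cons, ih, pvRep]

lemma pvRep_step (n : Nat) : ∀ i, pvRep n (pvStep i) = pvStep (pvRep n i) := by
  induction n with
  | zero => intro i; simp [pvRep]
  | succ n ih => intro i; simp [pvRep, ih]

lemma pvRep_iter (n : Nat) : pvRep n [[]] = pvIter n := by
  induction n with
  | zero => rfl
  | succ n ih => simp [pvRep, pvRep_step, ih, pvIter]

lemma pvFind?_of_filter_cons {α : Type} (p : α → Bool) (l : List α) (a : α) (as : List α)
    (h : l.filter p = a :: as) : l.find? p = some a := by
  induction l with
  | nil => simp at h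
  | cons x xs ih =>
    by_cases hp : p x
    · simp [hp] at h
      obtain ⟨rfl, -⟩ := h
      simp [hp]
    · simp [hp] at h
      simp [hp, ih h]

lemma pvBKeys_insert (d : PySem.Dict String String) (k v : String)
    (hv : (v == "B") = false) (hc : d.contains k = true) :
    pvBKeys (d.insert k v) = (pvBKeys d).filter (fun x => !(x == k)) := by
  unfold pvBKeys
  rw [PySem.Dict.items_insert_of_contains d v hc]
  rw [List.filter_map]
  have h1 : d.items.filter ((fun p : String × String => p.2 == "B") ∘ (fun p : String × String => if p.1 == k then (k, v) else p))
      = (d.items.filter (fun p => p.2 == "B")).filter (fun p => !(p.1 == k)) := by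
    rw [List.filter_filter]
    apply List.filter_congr
    intro p _
    by_cases hk : p.1 == k <;> simp [Function.comp, hk, hv]
  rw [h1]
  have h2 : ((d.items.filter (fun p => p.2 == "B")).filter (fun p => !(p.1 == k))).map
        (fun p : String × String => if p.1 == k then (k, v) else p)
      = (d.items.filter (fun p => p.2 == "B")).filter (fun p => !(p.1 == k)) := by
    have : ∀ p ∈ (d.items.filter (fun p => p.2 == "B")).filter (fun p => !(p.1 == k)),
        (if p.1 == k then (k, v) else p) = p := by
      intro p hp
      have := (List.mem_filter.mp hp).2
      simp at this
      simp [this]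
    calc ((d.items.filter (fun p => p.2 == "B")).filter (fun p => !(p.1 == k))).map
          (fun p : String × String => if p.1 == k then (k, v) else p)
        = ((d.items.filter (fun p => p.2 == "B")).filter (fun p => !(p.1 == k))).map id :=
          List.map_congr_left this
      _ = _ := List.map_id _
  rw [h2]
  rw [List.filter_map]
  apply congrArg
  apply List.filter_congr
  intro p _
  simp [Function.comp]

lemma pvBKeys_nodup (d : PySem.Dict String String) (hnd : d.keys.Nodup) :
    (pvBKeys d).Nodup := by
  have hs : (pvBKeys d).Sublist d.keys := by
    have := (List.filter_sublist (l := d.items) (p := fun p => p.2 == "B")).map Prod.fst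
    simpa [pvBKeys, PySem.Dict.keys] using this
  exact hnd.sublist hs

lemma pvGoA_eq (n : Nat) : ∀ (d : PySem.Dict String String) (l : List String) (fuel : Nat),
    d.keys.Nodup → (pvBKeys d).length = n → n < fuel →
    pvGoA fuel d l = (pvIter n).flatMap (fun c => pvLeaf (pvApply d ((pvBKeys d).zip c)) l) := by
  induction n with
  | zero =>
    intro d l fuel hnd hlen hfuel
    obtain ⟨f, rfl⟩ : ∃ f, fuel = f + 1 := ⟨fuel - 1, by omega⟩
    have hb : pvBKeys d = [] := List.eq_nil_of_length_eq_zero hlen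
    have hfil : d.items.filter (fun p => p.2 == "B") = [] := by
      unfold pvBKeys at hb
      exact List.map_eq_nil_iff.mp hb
    have hfind : pvFirstB d = none := by
      unfold pvFirstB
      rw [List.find?_eq_none]
      intro x hx hpx
      have : x ∈ d.items.filter (fun p => p.2 == "B") := List.mem_filter.mpr ⟨hx, hpx⟩
      rw [hfil] at this
      simp at this
    simp [pvGoA, hfind, pvIter, hb, pvApply]
  | succ n ih =>
    intro d l fuel hnd hlen hfuel
    obtain ⟨f, rfl⟩ : ∃ f, fuel = f + 1 := ⟨fuel - 1, by omega⟩
    cases hb : pvBKeys d with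
    | nil => rw [hb] at hlen; simp at hlen
    | cons k rest =>
      have hex : ∃ q qs, d.items.filter (fun p => p.2 == "B") = q :: qs ∧ q.1 = k := by
        unfold pvBKeys at hb
        cases hfil : d.items.filter (fun p => p.2 == "B") with
        | nil => rw [hfil] at hb; simp at hb
        | cons q qs =>
          rw [hfil] at hb
          simp at hb
          exact ⟨q, qs, rfl, hb.1⟩
      obtain ⟨q, qs, hfil, hq1⟩ := hex
      have hfind : pvFirstB d = some q := pvFind?_of_filter_cons _ _ _ _ hfil
      have hqmem : q ∈ d.items :=
        List.mem_of_mem_filter (by rw [hfil]; exact List.mem_cons_self)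
      have hcont : d.contains k = true := by
        rw [PySem.Dict.contains_iff_mem_keys]
        rw [← hq1]
        simpa [PySem.Dict.keys] using List.mem_map_of_mem hqmem (f := Prod.fst)
      have hnodupb : (pvBKeys d).Nodup := pvBKeys_nodup d hnd
      have hknotrest : k ∉ rest := by
        rw [hb] at hnodupb
        exact (List.nodup_cons.mp hnodupb).1
      have hrest : ∀ v, (v == "B") = false → pvBKeys (d.insert k v) = rest := by
        intro v hv
        rw [pvBKeys_insert d k v hv hcont, hb, List.filter_cons]
        simp only [beq_self_eq_true, Bool.not_true, Bool.false_eq_true, if_false]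
        apply List.filter_eq_self.mpr
        intro a ha
        have : ¬ a = k := fun hak => hknotrest (hak ▸ ha)
        simp [this]
      have hlenrest : rest.length = n := by
        rw [hb] at hlen
        simpa using hlen
      have hndT : ∀ v, (d.insert k v).keys.Nodup := fun v => PySem.Dict.nodup_keys_insert d k v hnd
      have hT := ih (d.insert k "T") l f (hndT "T")
        (by rw [hrest "T" (by decide)]; exact hlenrest) (by omega)
      have hF := ih (d.insert k "F") l f (hndT "F")
        (by rw [hrest "F" (by decide)]; exact hlenrest) (by omega)
      rw [hrest "T" (by decide)] at hT
      rw [hrest "F" (by decide)] at hF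
      show pvGoA (f+1) d l = _
      rw [show pvGoA (f+1) d l = match pvFirstB d with
          | some p => pvGoA f (d.insert p.1 "T") l ++ pvGoA f (d.insert p.1 "F") l
          | none => pvLeaf d l from rfl]
      rw [hfind]
      simp only [hq1]
      rw [hT, hF]
      simp only [pvIter, pvStep, List.flatMap_append, List.flatMap_map]
      rfl

-- membership in the T-key list is `get? = some "T"` (for nodup keys)
lemma pvTKeys_mem (e : PySem.Dict String String) (hnd : e.keys.Nodup) (k : String) :
    k ∈ pvTKeys e ↔ e.get? k = some "T" := by
  unfold pvTKeys
  simp only [List.mem_map, List.mem_filter]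
  constructor
  · rintro ⟨⟨k', v⟩, ⟨hmem, hT⟩, rfl⟩
    have hv : v = "T" := by simpa using hT
    subst hv
    exact PySem.Dict.get?_of_mem_items e hmem hnd
  · intro h
    exact ⟨(k, "T"), ⟨PySem.Dict.mem_items_of_get?_eq_some e h, by simp⟩, rfl⟩

-- CORE: A's whole-dict equality against a pattern P equals B's classifier conditions,
-- for the T-key set s of the pattern (pattern facts discharged by decide per pattern).
lemma pvDictEq_pattern (e P : PySem.Dict String String) (s : List String)
    (hnd : e.keys.Nodup)
    (hPk : P.keys = pvKeys6)
    (hPv : ∀ k ∈ pvKeys6, P.get? k = some (if s.contains k then "T" else "F"))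
    (hs : ∀ k ∈ s, k ∈ pvKeys6) :
    pvDictEq e P =
      ((e.keys.all (fun k => pvKeys6.contains k) && pvKeys6.all (fun k => e.keys.contains k))
       && !(e.values.any (fun v => !(v == "T") && !(v == "F")))
       && ((pvTKeys e).all (fun k => s.contains k) && s.all (fun k => (pvTKeys e).contains k))) := by
  have hP6 : P.size = pvKeys6.length := by
    have h1 : P.keys.length = P.items.length := by simp [PySem.Dict.keys]
    rw [PySem.Dict.size, ← h1, hPk]
  have hkn6 : pvKeys6.Nodup := by decide
  have hkeylen : e.keys.length = e.size := by simp [PySem.Dict.keys, PySem.Dict.size]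
  rw [Bool.eq_iff_iff]
  simp only [pvDictEq, Bool.and_eq_true, Bool.not_eq_true', List.any_eq_false,
    List.all_eq_true, beq_iff_eq, List.contains_iff_mem, beq_eq_false_iff_ne, ne_eq]
  constructor
  · rintro ⟨hsz, hall⟩
    have hsub : ∀ k ∈ e.keys, k ∈ pvKeys6 := by
      intro k hk
      obtain ⟨p, hp, rfl⟩ := List.mem_map.mp hk
      have h1 := hall p hp
      have hmem : p.1 ∈ P.keys :=
        PySem.Dict.mem_keys_of_mem_items P (PySem.Dict.mem_items_of_get?_eq_some P h1)
      rwa [hPk] at hmem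
    have hperm : e.keys.Perm pvKeys6 :=
      (List.subperm_of_subset hnd hsub).perm_of_length_le (by omega)
    have hsup : ∀ k ∈ pvKeys6, k ∈ e.keys := fun k hk => hperm.mem_iff.mpr hk
    have hgetP : ∀ p ∈ e.items, p.2 = (if s.contains p.1 then "T" else "F") := by
      intro p hp
      have h1 := hall p hp
      have h2 := hPv p.1 (hsub p.1 (PySem.Dict.mem_keys_of_mem_items e hp))
      rw [h1] at h2
      exact Option.some_injective _ h2
    refine ⟨⟨⟨hsub, hsup⟩, ?_⟩, ?_, ?_⟩
    · intro v hv
      obtain ⟨p, hp, rfl⟩ := List.mem_map.mp hv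
      have h1 := hgetP p hp
      by_cases hc : s.contains p.1 = true
      · rw [if_pos hc] at h1; simp [h1]
      · rw [if_neg hc] at h1; simp [h1]
    · intro k hk
      have hget := (pvTKeys_mem e hnd k).mp hk
      have hkv : (k, "T") ∈ e.items := PySem.Dict.mem_items_of_get?_eq_some e hget
      have h1 := hgetP (k, "T") hkv
      by_cases hc : s.contains k = true
      · exact List.contains_iff_mem.mp hc
      · simp at h1
        exact h1
    · intro k hk
      have hke : k ∈ e.keys := hsup k (hs k hk)
      obtain ⟨p, hp, hfst⟩ := List.mem_map.mp hke
      have h1 := hgetP p hp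
      rw [hfst, List.contains_iff_mem.mpr hk] at h1
      simp only [if_true] at h1
      apply (pvTKeys_mem e hnd k).mpr
      rw [← hfst, ← h1]
      exact PySem.Dict.get?_of_mem_items e hp hnd
  · rintro ⟨⟨⟨hsub, hsup⟩, htf⟩, hts, hst⟩
    have hperm : e.keys.Perm pvKeys6 :=
      (List.perm_ext_iff_of_nodup hnd hkn6).mpr (fun a => ⟨hsub a, hsup a⟩)
    constructor
    · have h1 : e.keys.length = pvKeys6.length := hperm.length_eq
      omega
    · intro p hp
      have hk6 : p.1 ∈ pvKeys6 := hsub p.1 (PySem.Dict.mem_keys_of_mem_items e hp)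
      rw [hPv p.1 hk6]
      have hv : p.2 = "T" ∨ p.2 = "F" := by
        have h1 := htf p.2 (List.mem_map.mpr ⟨p, hp, rfl⟩)
        by_cases hT : p.2 = "T"
        · exact Or.inl hT
        · exact Or.inr (by tauto)
      have hget : e.get? p.1 = some p.2 := PySem.Dict.get?_of_mem_items e hp hnd
      rcases hv with h | h
      · have h1 : p.1 ∈ pvTKeys e := (pvTKeys_mem e hnd p.1).mpr (by rw [hget, h])
        have h2 := hts p.1 h1
        rw [List.contains_iff_mem.mpr h2]
        simp [h]
      · have hns : s.contains p.1 = false := by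
          rw [Bool.eq_false_iff]
          intro hc
          have h1 := hst p.1 (List.contains_iff_mem.mp hc)
          have h2 := (pvTKeys_mem e hnd p.1).mp h1
          rw [hget] at h2
          simp [h] at h2
        have hnm : p.1 ∉ s := by simpa using hns
        simp [hnm, h]

lemma pvLeaf_eq (e : PySem.Dict String String) (l : List String) (hnd : e.keys.Nodup) :
    pvLeaf e l = l ++ (pvLabel e).toList := by
  have h1 := pvDictEq_pattern e pvPatNFTB ["ftb"] hnd (by decide) (by decide) (by decide)
  have h2 := pvDictEq_pattern e pvPatNMH ["moving_home"] hnd (by decide) (by decide) (by decide)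
  have h3 := pvDictEq_pattern e pvPatNRM ["remortgage"] hnd (by decide) (by decide) (by decide)
  have h4 := pvDictEq_pattern e pvPatEDE ["existing_customer", "remortgage"] hnd (by decide) (by decide) (by decide)
  have h5 := pvDictEq_pattern e pvPatEMH ["existing_customer", "moving_home"] hnd (by decide) (by decide) (by decide)
  have h6 := pvDictEq_pattern e pvPatEBM ["existing_customer", "borrowing_more"] hnd (by decide) (by decide) (by decide)
  have h7 := pvDictEq_pattern e pvPatEED ["existing_customer", "switching"] hnd (by decide) (by decide) (by decide)
  rw [pvLeaf, h1, h2, h3, h4, h5, h6, h7]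
  unfold pvLabel
  by_cases hg : (e.keys.all (fun k => pvKeys6.contains k) && pvKeys6.all (fun k => e.keys.contains k)) = true
  · by_cases htf : (e.values.any (fun v => !(v == "T") && !(v == "F"))) = true
    · simp [htf]
    · have htf' : (e.values.any (fun v => !(v == "T") && !(v == "F"))) = false := by
        rwa [Bool.not_eq_true] at htf
      simp only [hg, htf', Bool.not_false, Bool.true_and, Bool.and_true]
      clear h1 h2 h3 h4 h5 h6 h7
      simp only [pvTSets]
      by_cases hc1 : (((pvTKeys e).all (fun k => (["ftb"]).contains k)) && (["ftb"]).all (fun k => (pvTKeys e).contains k)) = true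
      · rw [if_pos hc1, List.find?_cons_of_pos (by simpa [pvTKeys] using hc1)]
        simp
      · rw [if_neg hc1, List.find?_cons_of_neg (by simpa [pvTKeys] using hc1)]
        by_cases hc2 : (((pvTKeys e).all (fun k => (["moving_home"]).contains k)) && (["moving_home"]).all (fun k => (pvTKeys e).contains k)) = true
        · rw [if_pos hc2, List.find?_cons_of_pos (by simpa [pvTKeys] using hc2)]
          simp
        · rw [if_neg hc2, List.find?_cons_of_neg (by simpa [pvTKeys] using hc2)]
          by_cases hc3 : (((pvTKeys e).all (fun k => (["remortgage"]).contains k)) && (["remortgage"]).all (fun k => (pvTKeys e).contains k)) = true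
          · rw [if_pos hc3, List.find?_cons_of_pos (by simpa [pvTKeys] using hc3)]
            simp
          · rw [if_neg hc3, List.find?_cons_of_neg (by simpa [pvTKeys] using hc3)]
            by_cases hc4 : (((pvTKeys e).all (fun k => (["existing_customer", "remortgage"]).contains k)) && (["existing_customer", "remortgage"]).all (fun k => (pvTKeys e).contains k)) = true
            · rw [if_pos hc4, List.find?_cons_of_pos (by simpa [pvTKeys] using hc4)]
              simp
            · rw [if_neg hc4, List.find?_cons_of_neg (by simpa [pvTKeys] using hc4)]
              by_cases hc5 : (((pvTKeys e).all (fun k => (["existing_customer", "moving_home"]).contains k)) && (["existing_customer", "moving_home"]).all (fun k => (pvTKeys e).contains k)) = true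
              · rw [if_pos hc5, List.find?_cons_of_pos (by simpa [pvTKeys] using hc5)]
                simp
              · rw [if_neg hc5, List.find?_cons_of_neg (by simpa [pvTKeys] using hc5)]
                by_cases hc6 : (((pvTKeys e).all (fun k => (["existing_customer", "borrowing_more"]).contains k)) && (["existing_customer", "borrowing_more"]).all (fun k => (pvTKeys e).contains k)) = true
                · rw [if_pos hc6, List.find?_cons_of_pos (by simpa [pvTKeys] using hc6)]
                  simp
                · rw [if_neg hc6, List.find?_cons_of_neg (by simpa [pvTKeys] using hc6)]
                  by_cases hc7 : (((pvTKeys e).all (fun k => (["existing_customer", "switching"]).contains k)) && (["existing_customer", "switching"]).all (fun k => (pvTKeys e).contains k)) = true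
                  · rw [if_pos hc7, List.find?_cons_of_pos (by simpa [pvTKeys] using hc7)]
                    simp
                  · rw [if_neg hc7, List.find?_cons_of_neg (by simpa [pvTKeys] using hc7)]
                    simp
  · have hgp : ¬((∀ x ∈ e.keys, x ∈ pvKeys6) ∧ ∀ x ∈ pvKeys6, x ∈ e.keys) := by
      simpa using hg
    simp [hgp]

-- B's output loop over the combos as a flatMap
lemma pvFoldl_out (d : PySem.Dict String String) (bk : List String) (l : List String) :
    ∀ (cs : List (List String)) (acc : List String),
    cs.foldl (fun out c => match pvLabel (pvApply d (bk.zip c)) with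
      | some lab => out ++ l ++ [lab] | none => out ++ l) acc
      = acc ++ cs.flatMap (fun c => l ++ (pvLabel (pvApply d (bk.zip c))).toList) := by
  intro cs
  induction cs with
  | nil => intro acc; simp
  | cons c cs ih =>
    intro acc
    rw [List.foldl_cons, ih]
    have hstep : (match pvLabel (pvApply d (bk.zip c)) with
        | some lab => acc ++ l ++ [lab] | none => acc ++ l)
        = acc ++ (l ++ (pvLabel (pvApply d (bk.zip c))).toList) := by
      cases pvLabel (pvApply d (bk.zip c)) <;> simp
    rw [hstep]
    simp [List.flatMap_cons]

-- ===== VERDICT (by name: the statement is the Claim_ definition above) =====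
theorem validate_eligibility_dict_spec : Claim_equal_validate_eligibility_dict := by
  intro el l _
  unfold Spec_validate_eligibility_dict
  show pvGoA ((PySem.Dict.ofList el).size + 1) (PySem.Dict.ofList el) l
      = ((pvBKeys (PySem.Dict.ofList el)).foldl (fun cs _ => pvStep cs) [[]]).foldl
          (fun out c =>
            match pvLabel (pvApply (PySem.Dict.ofList el) ((pvBKeys (PySem.Dict.ofList el)).zip c)) with
            | some lab => out ++ l ++ [lab]
            | none => out ++ l) []
  have hnd : (PySem.Dict.ofList el).keys.Nodup := PySem.Dict.nodup_keys_ofList el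
  have hle : (pvBKeys (PySem.Dict.ofList el)).length ≤ (PySem.Dict.ofList el).size := by
    simp only [pvBKeys, List.length_map, PySem.Dict.size]
    exact List.length_filter_le _ _
  rw [pvFoldl_rep, pvRep_iter, pvFoldl_out, List.nil_append]
  rw [pvGoA_eq (pvBKeys (PySem.Dict.ofList el)).length (PySem.Dict.ofList el) l _ hnd rfl (by omega)]
  have hfun : (fun c => pvLeaf (pvApply (PySem.Dict.ofList el) ((pvBKeys (PySem.Dict.ofList el)).zip c)) l)
      = (fun c => l ++ (pvLabel (pvApply (PySem.Dict.ofList el) ((pvBKeys (PySem.Dict.ofList el)).zip c))).toList) := by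
    funext c
    exact pvLeaf_eq _ l
      (PySem.Dict.nodup_keys_foldl_insert_key ((pvBKeys (PySem.Dict.ofList el)).zip c) Prod.fst
        (fun _ x => x.2) (PySem.Dict.ofList el) hnd)
  rw [hfun]
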